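-- pv_equiv track=rewrite | github.com/sunyumail93/FastaProcessing | FastaNonATGCremover.py | NonATGCremover
-- ===== SOURCE A (Python) =====
-- def NonATGCremover(Seq):
--     Char=list(Seq)
--     i=0
--     for char in Char:
--         i=i+1
--         if ( char == "a" ) or (char== "t") or (char== "g" ) or ( char== "c" ):
--             continue
--         else:
--             Char[i-1] = "n"
--     newSeq="".join(Char)
--     return newSeq
-- ===== SOURCE B (Python) =====
-- import re
--
-- def NonATGCremover(Seq):
--     return re.sub(r'[^atgc]', 'n', Seq)
-- ===== Notes on version B (the rewrite author's own statement) =====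
-- stated objective: idiomatic
-- what changed: Replaces A's index-tracked loop that mutates a list copy with a single regex substitution re.sub(r'[^atgc]', 'n', Seq), delegating classification and replacement to the regex engine with no list or index.
import Mathlib
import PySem

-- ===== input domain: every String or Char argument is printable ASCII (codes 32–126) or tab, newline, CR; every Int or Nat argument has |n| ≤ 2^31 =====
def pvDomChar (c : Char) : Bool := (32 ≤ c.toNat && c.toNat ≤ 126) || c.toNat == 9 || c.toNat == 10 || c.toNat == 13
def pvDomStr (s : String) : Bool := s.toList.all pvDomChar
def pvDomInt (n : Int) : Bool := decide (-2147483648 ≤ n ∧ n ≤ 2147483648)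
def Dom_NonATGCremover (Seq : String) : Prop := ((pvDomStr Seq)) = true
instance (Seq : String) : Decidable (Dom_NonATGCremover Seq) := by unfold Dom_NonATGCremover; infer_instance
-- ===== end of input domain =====

-- B replaces A's index-tracked loop mutating a list copy with a single regex substitution (ported as a per-char map); objective: idiomatic.

-- ===== PORT A =====
-- one loop step: i = i + 1; if char is a/t/g/c continue, else Char[i-1] = "n"
def pvStepA (st : Nat × List Char) (c : Char) : Nat × List Char :=
  let i := st.1 + 1
  if c = 'a' ∨ c = 't' ∨ c = 'g' ∨ c = 'c' then (i, st.2)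
  else (i, st.2.set (i - 1) 'n')

def NonATGCremover (Seq : String) : String :=
  let Char := Seq.toList
  let fin := Char.foldl pvStepA (0, Char)
  String.mk fin.2

-- ===== PORT B =====
-- re.sub(r'[^atgc]', 'n', Seq): every char not in [atgc] is replaced by 'n'
def pvSubChar (c : Char) : Char :=
  if c = 'a' ∨ c = 't' ∨ c = 'g' ∨ c = 'c' then c else 'n'

def NonATGCremover_alt (Seq : String) : String :=
  String.mk (Seq.toList.map pvSubChar)

-- ===== PRECONDITION & SPEC =====
def Spec_NonATGCremover (Seq : String) (out : String) : Prop := out = NonATGCremover_alt Seq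
instance (Seq : String) (out : String) : Decidable (Spec_NonATGCremover Seq out) := by unfold Spec_NonATGCremover; infer_instance

-- ===== CLAIM (what is proved, stated in full; the proofs are below) =====
def Claim_equal_NonATGCremover : Prop := ∀ (Seq : String), Dom_NonATGCremover Seq → Spec_NonATGCremover Seq (NonATGCremover Seq)

-- ===== LEMMAS AND PROOFS =====
theorem pv_loop (cs pre : List Char) :
    (cs.foldl pvStepA (pre.length, pre ++ cs)).2 = pre ++ cs.map pvSubChar := by
  induction cs generalizing pre with
  | nil => simp
  | cons c cs ih =>
    by_cases h : c = 'a' ∨ c = 't' ∨ c = 'g' ∨ c = 'c'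
    · have : pvStepA (pre.length, pre ++ c :: cs) c = ((pre ++ [c]).length, (pre ++ [c]) ++ cs) := by
        simp [pvStepA, h]
      have h2 := ih (pre ++ [c])
      simp only [List.foldl_cons, this, h2]
      simp [pvSubChar, h]
    · have : pvStepA (pre.length, pre ++ c :: cs) c = ((pre ++ ['n']).length, (pre ++ ['n']) ++ cs) := by
        simp [pvStepA, h]
      have h2 := ih (pre ++ ['n'])
      simp only [List.foldl_cons, this, h2]
      simp [pvSubChar, h]

-- ===== VERDICT (by name: the statement is the Claim_ definition above) =====
theorem NonATGCremover_spec : Claim_equal_NonATGCremover := by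
  intro Seq _
  unfold Spec_NonATGCremover NonATGCremover NonATGCremover_alt
  exact congrArg String.mk (by simpa using pv_loop Seq.toList [])
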